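-- pv_equiv track=rewrite | github.com/brunolnetto/scrapper-rf-cnpj | scripts/quality_report.py | summarize_raw
-- ===== SOURCE A (Python) =====
-- from typing import Dict, Any, List, Tuple
--
-- def summarize_raw(raw: Dict[str, Any]) -> Dict[str, int]:
--     totals = {"loc": 0, "lloc": 0, "sloc": 0, "comments": 0, "blank": 0}
--     for v in raw.values():
--         totals["loc"] += int(v.get("loc", 0))
--         totals["lloc"] += int(v.get("lloc", 0))
--         totals["sloc"] += int(v.get("sloc", 0))
--         totals["comments"] += int(v.get("comments", 0))
--         totals["blank"] += int(v.get("blank", 0))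
--     return totals
-- ===== SOURCE B (Python) =====
-- def summarize_raw(raw):
--     keys = ("loc", "lloc", "sloc", "comments", "blank")
--
--     def total(vals):
--         if not vals:
--             return {k: 0 for k in keys}
--         if len(vals) == 1:
--             v = vals[0]
--             return {k: int(v.get(k, 0)) for k in keys}
--         mid = len(vals) // 2
--         left, right = total(vals[:mid]), total(vals[mid:])
--         return {k: left[k] + right[k] for k in keys}
--
--     return total(list(raw.values()))
-- ===== Notes on version B (the rewrite author's own statement) =====
-- stated objective: alternative
-- what changed: Replaces A's single linear pass over the values with a divide-and-conquer recursion: the value list is split in half, each half's totals are computed recursively, and the two five-key partial-total dicts are merged by componentwise addition (correct because integer addition is associative/commutative).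
import Mathlib
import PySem

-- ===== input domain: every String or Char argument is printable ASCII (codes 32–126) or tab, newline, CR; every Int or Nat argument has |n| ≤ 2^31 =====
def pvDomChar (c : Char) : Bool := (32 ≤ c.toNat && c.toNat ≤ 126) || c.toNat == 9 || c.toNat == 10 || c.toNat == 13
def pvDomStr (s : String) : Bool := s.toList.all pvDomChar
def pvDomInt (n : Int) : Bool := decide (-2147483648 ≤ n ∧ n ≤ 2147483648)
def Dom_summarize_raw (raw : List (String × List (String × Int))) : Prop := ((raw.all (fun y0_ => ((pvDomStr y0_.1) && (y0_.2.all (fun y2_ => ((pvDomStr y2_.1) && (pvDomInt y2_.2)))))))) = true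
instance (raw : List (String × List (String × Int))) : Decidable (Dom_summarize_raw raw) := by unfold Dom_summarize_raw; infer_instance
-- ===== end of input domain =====

-- B replaces A's single linear accumulating pass with a divide-and-conquer recursion that
-- splits the value list in half and merges per-key partial totals (alternative, same cost).

-- ===== PORT A =====
-- one loop over raw.values(), updating the five entries of the mutable totals dict in place
def summarize_raw (raw : List (String × List (String × Int))) : List (String × Int) :=
  let totals0 : PySem.Dict String Int :=
    PySem.Dict.mk [("loc", 0), ("lloc", 0), ("sloc", 0), ("comments", 0), ("blank", 0)]
  let totals := (raw.map (·.2)).foldl (fun t v =>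
    let t := t.modify "loc" 0 (· + (PySem.Dict.mk v).getD "loc" 0)
    let t := t.modify "lloc" 0 (· + (PySem.Dict.mk v).getD "lloc" 0)
    let t := t.modify "sloc" 0 (· + (PySem.Dict.mk v).getD "sloc" 0)
    let t := t.modify "comments" 0 (· + (PySem.Dict.mk v).getD "comments" 0)
    let t := t.modify "blank" 0 (· + (PySem.Dict.mk v).getD "blank" 0)
    t) totals0
  totals.items

-- ===== PORT B =====
def pvKeys : List String := ["loc", "lloc", "sloc", "comments", "blank"]

-- inner helper `total(vals)` of Source B: divide and conquer over the list of value dicts.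
-- `left[k]` / `right[k]` always succeed (both dicts carry exactly the five keys), so the
-- lookup is ported as getD with default 0 (the default is never used).
def pvTotal (vs : List (List (String × Int))) : List (String × Int) :=
  match vs with
  | [] => pvKeys.map (fun k => (k, (0 : Int)))
  | [v] => pvKeys.map (fun k => (k, (PySem.Dict.mk v).getD k 0))
  | v1 :: v2 :: rest =>
      let vals := v1 :: v2 :: rest
      let mid := vals.length / 2
      let left := pvTotal (vals.take mid)
      let right := pvTotal (vals.drop mid)
      pvKeys.map (fun k => (k, (PySem.Dict.mk left).getD k 0 + (PySem.Dict.mk right).getD k 0))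
termination_by vs.length
decreasing_by
  · simp only [List.length_take]; simp only [List.length_cons]; omega
  · simp only [List.length_drop]; simp only [List.length_cons]; omega

def summarize_raw_alt (raw : List (String × List (String × Int))) : List (String × Int) :=
  pvTotal (raw.map (·.2))

-- ===== PRECONDITION & SPEC =====
def Spec_summarize_raw (raw : List (String × List (String × Int))) (out : List (String × Int)) : Prop := out = summarize_raw_alt raw
instance (raw : List (String × List (String × Int))) (out : List (String × Int)) : Decidable (Spec_summarize_raw raw out) := by unfold Spec_summarize_raw; infer_instance

-- ===== CLAIM (what is proved, stated in full; the proofs are below) =====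
def Claim_equal_summarize_raw : Prop := ∀ (raw : List (String × List (String × Int))), Dom_summarize_raw raw → Spec_summarize_raw raw (summarize_raw raw)

-- ===== LEMMAS AND PROOFS =====

def pvSumKey (k : String) (vs : List (List (String × Int))) : Int :=
  vs.foldl (fun acc v => acc + (PySem.Dict.mk v).getD k 0) 0

theorem pv_foldl_shift (f : List (String × Int) → Int) (vs : List (List (String × Int))) (i : Int) :
    vs.foldl (fun acc v => acc + f v) i = i + vs.foldl (fun acc v => acc + f v) 0 := by
  induction vs generalizing i with
  | nil => simp
  | cons x xs ih => simp only [List.foldl_cons]; rw [ih (i + f x), ih (0 + f x)]; ring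

theorem pvSumKey_append (k : String) (l1 l2 : List (List (String × Int))) :
    pvSumKey k (l1 ++ l2) = pvSumKey k l1 + pvSumKey k l2 := by
  unfold pvSumKey
  rw [List.foldl_append, pv_foldl_shift]

-- one step of A's loop on the concrete five-key totals dict
theorem pv_step_eq (a b c d e : Int) (v : List (String × Int)) :
    (let t := (PySem.Dict.mk [("loc", a), ("lloc", b), ("sloc", c), ("comments", d), ("blank", e)] : PySem.Dict String Int)
     let t := t.modify "loc" 0 (· + (PySem.Dict.mk v).getD "loc" 0)
     let t := t.modify "lloc" 0 (· + (PySem.Dict.mk v).getD "lloc" 0)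
     let t := t.modify "sloc" 0 (· + (PySem.Dict.mk v).getD "sloc" 0)
     let t := t.modify "comments" 0 (· + (PySem.Dict.mk v).getD "comments" 0)
     let t := t.modify "blank" 0 (· + (PySem.Dict.mk v).getD "blank" 0)
     t) =
    PySem.Dict.mk [("loc", a + (PySem.Dict.mk v).getD "loc" 0),
                   ("lloc", b + (PySem.Dict.mk v).getD "lloc" 0),
                   ("sloc", c + (PySem.Dict.mk v).getD "sloc" 0),
                   ("comments", d + (PySem.Dict.mk v).getD "comments" 0),
                   ("blank", e + (PySem.Dict.mk v).getD "blank" 0)] := by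
  rfl

-- A's loop computes the five per-key sums
theorem pv_main (vs : List (List (String × Int))) (a b c d e : Int) :
    (vs.foldl (fun t v =>
      let t := t.modify "loc" 0 (· + (PySem.Dict.mk v).getD "loc" 0)
      let t := t.modify "lloc" 0 (· + (PySem.Dict.mk v).getD "lloc" 0)
      let t := t.modify "sloc" 0 (· + (PySem.Dict.mk v).getD "sloc" 0)
      let t := t.modify "comments" 0 (· + (PySem.Dict.mk v).getD "comments" 0)
      let t := t.modify "blank" 0 (· + (PySem.Dict.mk v).getD "blank" 0)
      t) (PySem.Dict.mk [("loc", a), ("lloc", b), ("sloc", c), ("comments", d), ("blank", e)])).items =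
    [("loc", a + pvSumKey "loc" vs), ("lloc", b + pvSumKey "lloc" vs),
     ("sloc", c + pvSumKey "sloc" vs), ("comments", d + pvSumKey "comments" vs),
     ("blank", e + pvSumKey "blank" vs)] := by
  induction vs generalizing a b c d e with
  | nil => simp [pvSumKey]
  | cons x xs ih =>
    rw [List.foldl_cons, pv_step_eq, ih]
    simp only [pvSumKey, List.foldl_cons, zero_add]
    rw [pv_foldl_shift (fun v => (PySem.Dict.mk v).getD "loc" 0) xs ((PySem.Dict.mk x).getD "loc" 0),
        pv_foldl_shift (fun v => (PySem.Dict.mk v).getD "lloc" 0) xs ((PySem.Dict.mk x).getD "lloc" 0),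
        pv_foldl_shift (fun v => (PySem.Dict.mk v).getD "sloc" 0) xs ((PySem.Dict.mk x).getD "sloc" 0),
        pv_foldl_shift (fun v => (PySem.Dict.mk v).getD "comments" 0) xs ((PySem.Dict.mk x).getD "comments" 0),
        pv_foldl_shift (fun v => (PySem.Dict.mk v).getD "blank" 0) xs ((PySem.Dict.mk x).getD "blank" 0)]
    simp [add_assoc]

-- B's divide-and-conquer also computes the five per-key sums
theorem pvTotal_eq (vs : List (List (String × Int))) :
    pvTotal vs = [("loc", pvSumKey "loc" vs), ("lloc", pvSumKey "lloc" vs),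
                  ("sloc", pvSumKey "sloc" vs), ("comments", pvSumKey "comments" vs),
                  ("blank", pvSumKey "blank" vs)] := by
  fun_induction pvTotal vs with
  | case1 => simp [pvKeys, pvSumKey]
  | case2 v => simp [pvKeys, pvSumKey]
  | case3 v1 v2 rest vals mid left right ihl ihr =>
    have hsplit : vals.take mid ++ vals.drop mid = vals := List.take_append_drop mid vals
    simp only [left, right, ihl, ihr, pvKeys, List.map_cons, List.map_nil]
    have h : ∀ k : String, pvSumKey k (vals.take mid) + pvSumKey k (vals.drop mid) = pvSumKey k vals := by
      intro k; rw [← pvSumKey_append, hsplit]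
    simp [PySem.Dict.getD, PySem.Dict.get?, h]
    exact ⟨rfl, rfl, rfl, rfl, rfl⟩

-- ===== VERDICT (by name: the statement is the Claim_ definition above) =====
theorem summarize_raw_spec : Claim_equal_summarize_raw := by
  intro raw _
  unfold Spec_summarize_raw summarize_raw summarize_raw_alt
  simp only []
  rw [pv_main, pvTotal_eq]
  simp
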